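-- pv_equiv track=rewrite | github.com/sarthakvarora/Data-Structures | mem.py | convert_int32_to_bytes
-- ===== SOURCE A (Python) =====
-- def convert_int32_to_bytes(int32value): # Done, needs fixes
--     if int32value>=0:
--         binary = [0]
--     else:
--         binary = [1]
--     while int32value//2>0:
--         rem = int32value%2
--         int32value = int32value//2
--         binary.append(rem)
--     flip_binary = []
--     for i in range(len(binary)):
--         flip_binary.append(binary[-(i+1)])
--     b11 = flip_binary[0:8]
--     b21 = flip_binary[8:16]
--     b31 = flip_binary[16:24]
--     b41 = flip_binary[24:32]
--     b1,b2,b3,b4 = "","","",""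
--     for i in b11:
--         b1 = b1 + str(i)
--     for i in b21:
--         b2 = b2 + str(i)
--     for i in b31:
--         b3 = b3 + str(i)
--     for i in b41:
--         b4 = b4 + str(i)
--     return b1, b2, b3, b4
-- ===== SOURCE B (Python) =====
-- def convert_int32_to_bytes(int32value):
--     def digits(v):
--         # binary digits of v above the stopping point, most significant first
--         if v // 2 > 0:
--             return digits(v // 2) + str(v % 2)
--         return ""
--     s = digits(int32value) + ("0" if int32value >= 0 else "1")
--     return s[0:8], s[8:16], s[16:24], s[24:32]
-- ===== Notes on version B (the rewrite author's own statement) =====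
-- stated objective: simpler
-- what changed: B replaces A's iterative LSB-first digit collection, index-wise reversal loop and four character-concatenation loops with a single recursion that emits the digits most-significant-first directly, then string slicing.
import Mathlib
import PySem

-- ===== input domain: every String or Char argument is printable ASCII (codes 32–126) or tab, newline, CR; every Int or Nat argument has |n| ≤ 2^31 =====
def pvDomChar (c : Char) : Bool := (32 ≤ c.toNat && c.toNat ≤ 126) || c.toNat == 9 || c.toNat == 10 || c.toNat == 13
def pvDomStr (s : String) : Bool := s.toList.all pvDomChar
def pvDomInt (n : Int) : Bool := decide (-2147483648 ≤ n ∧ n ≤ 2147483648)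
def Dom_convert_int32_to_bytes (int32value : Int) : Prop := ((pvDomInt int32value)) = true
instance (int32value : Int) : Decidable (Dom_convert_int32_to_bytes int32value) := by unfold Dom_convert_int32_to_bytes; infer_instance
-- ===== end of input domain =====

-- B replaces A's iterative LSB-first digit collection, reversal loop and four
-- concatenation loops with one recursion emitting digits MSB-first, then slicing ('simpler'; no speed claim).

-- ===== PORT A =====
-- the while loop: while int32value//2>0: rem = int32value%2; int32value //= 2; binary.append(rem)
def pvLoopA (v : Int) (acc : List Int) : List Int :=
  if 0 < PySem.Int.floordiv v 2 then
    pvLoopA (PySem.Int.floordiv v 2) (acc ++ [PySem.Int.mod v 2])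
  else acc
termination_by v.toNat
decreasing_by
  rename_i h
  have h2 : PySem.Int.floordiv v 2 = v / 2 := PySem.Int.floordiv_eq_ediv_of_pos (by omega)
  rw [h2] at h ⊢; omega

-- builds one byte string: for i in bxx: b = b + str(i)  (string built as List Char, exact: str(i) = PySem.Int.toChars i)
def pvByteA (l : List Int) : String :=
  String.ofList (l.foldl (fun cs i => cs ++ PySem.Int.toChars i) [])

def convert_int32_to_bytes (int32value : Int) : String × String × String × String :=
  let binary := if int32value ≥ 0 then [(0:Int)] else [(1:Int)]
  let binary := pvLoopA int32value binary
  let flip_binary := (PySem.List.pyRange 0 binary.length 1).foldl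
      (fun fb i => fb ++ [PySem.List.pyGetD binary (-(i+1)) 0]) []
  let b11 := PySem.List.slice flip_binary (some 0) (some 8)
  let b21 := PySem.List.slice flip_binary (some 8) (some 16)
  let b31 := PySem.List.slice flip_binary (some 16) (some 24)
  let b41 := PySem.List.slice flip_binary (some 24) (some 32)
  (pvByteA b11, pvByteA b21, pvByteA b31, pvByteA b41)

-- ===== PORT B =====
-- def digits(v): if v // 2 > 0: return digits(v // 2) + str(v % 2); return ""
def pvDigitsB (v : Int) : List Char :=
  if 0 < PySem.Int.floordiv v 2 then
    pvDigitsB (PySem.Int.floordiv v 2) ++ PySem.Int.toChars (PySem.Int.mod v 2)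
  else []
termination_by v.toNat
decreasing_by
  rename_i h
  have h2 : PySem.Int.floordiv v 2 = v / 2 := PySem.Int.floordiv_eq_ediv_of_pos (by omega)
  rw [h2] at h ⊢; omega

def convert_int32_to_bytes_alt (int32value : Int) : String × String × String × String :=
  let s : List Char := pvDigitsB int32value ++ (if int32value ≥ 0 then ['0'] else ['1'])
  (String.ofList (PySem.List.slice s (some 0) (some 8)),
   String.ofList (PySem.List.slice s (some 8) (some 16)),
   String.ofList (PySem.List.slice s (some 16) (some 24)),
   String.ofList (PySem.List.slice s (some 24) (some 32)))

-- ===== PRECONDITION & SPEC =====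
def Spec_convert_int32_to_bytes (int32value : Int) (out : String × String × String × String) : Prop := out = convert_int32_to_bytes_alt int32value
instance (int32value : Int) (out : String × String × String × String) : Decidable (Spec_convert_int32_to_bytes int32value out) := by unfold Spec_convert_int32_to_bytes; infer_instance

-- ===== CLAIM (what is proved, stated in full; the proofs are below) =====
def Claim_equal_convert_int32_to_bytes : Prop := ∀ (int32value : Int), Dom_convert_int32_to_bytes int32value → Spec_convert_int32_to_bytes int32value (convert_int32_to_bytes int32value)

-- ===== LEMMAS AND PROOFS =====

def pvBitChar (i : Int) : Char := if i = 1 then '1' else '0'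

-- the low bits of n, least-significant first, most-significant bit dropped
def pvLowBits : Nat → List Int
  | 0 => []
  | 1 => []
  | n+2 => ((n+2) % 2 : Nat) :: pvLowBits ((n+2)/2)

theorem pvLoopA_eq (n : Nat) (acc : List Int) : pvLoopA (n : Int) acc = acc ++ pvLowBits n := by
  induction n using Nat.strong_induction_on generalizing acc with
  | _ n ih =>
    have hfd : PySem.Int.floordiv (n : Int) 2 = ((n/2 : Nat) : Int) := by
      exact_mod_cast PySem.Int.floordiv_natCast n 2
    have hmod : PySem.Int.mod (n : Int) 2 = ((n%2 : Nat) : Int) := by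
      exact_mod_cast PySem.Int.mod_natCast n 2
    rw [pvLoopA, hfd, hmod]
    match n with
    | 0 => simp [pvLowBits]
    | 1 => simp [pvLowBits]
    | m+2 =>
      have hpos : (0:Int) < (((m+2)/2 : Nat) : Int) := by
        have : 1 ≤ (m+2)/2 := Nat.le_div_iff_mul_le (by omega) |>.mpr (by omega)
        exact_mod_cast this
      rw [if_pos hpos, ih ((m+2)/2) (by omega)]
      simp [pvLowBits]

theorem pvLowBits_mem (n : Nat) : ∀ x ∈ pvLowBits n, x = 0 ∨ x = 1 := by
  induction n using Nat.strong_induction_on with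
  | _ n ih =>
    match n with
    | 0 => simp [pvLowBits]
    | 1 => simp [pvLowBits]
    | m+2 =>
      intro x hx
      rw [pvLowBits] at hx
      rcases List.mem_cons.mp hx with h | h
      · subst h; omega
      · exact ih ((m+2)/2) (by omega) x h

-- B's recursion produces exactly A's collected-then-reversed digits
theorem pvDigitsB_eq (n : Nat) :
    pvDigitsB (n : Int) = (pvLowBits n).reverse.map pvBitChar := by
  induction n using Nat.strong_induction_on with
  | _ n ih =>
    have hfd : PySem.Int.floordiv (n : Int) 2 = ((n/2 : Nat) : Int) := by
      exact_mod_cast PySem.Int.floordiv_natCast n 2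
    have hmod : PySem.Int.mod (n : Int) 2 = ((n%2 : Nat) : Int) := by
      exact_mod_cast PySem.Int.mod_natCast n 2
    rw [pvDigitsB, hfd, hmod]
    match n with
    | 0 => simp [pvLowBits]
    | 1 => simp [pvLowBits]
    | m+2 =>
      have hpos : (0:Int) < (((m+2)/2 : Nat) : Int) := by
        have : 1 ≤ (m+2)/2 := Nat.le_div_iff_mul_le (by omega) |>.mpr (by omega)
        exact_mod_cast this
      rw [if_pos hpos, ih ((m+2)/2) (by omega)]
      rw [pvLowBits]
      rw [List.reverse_cons, List.map_append]
      congr 1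
      have h01 : ((m+2) % 2 : Nat) = 0 ∨ ((m+2) % 2 : Nat) = 1 := by omega
      rcases h01 with h | h <;> rw [h] <;> rfl

-- the index loop building flip_binary is List.reverse
theorem pvFlip_eq (l : List Int) :
    (PySem.List.pyRange 0 l.length 1).foldl (fun fb i => fb ++ [PySem.List.pyGetD l (-(i+1)) 0]) []
      = l.reverse := by
  rw [PySem.List.foldl_append_singleton_eq_map]
  rw [PySem.List.pyRange_one]
  simp only [List.map_map, List.nil_append, sub_zero, Int.toNat_natCast]
  apply List.ext_getElem
  · simp
  · intro k h1 h2
    simp only [List.getElem_map, List.getElem_range, Function.comp_apply]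
    have hk : k < l.length := by simpa using h1
    rw [zero_add]
    have hc : (-((k:Int)+1)) = -(((k+1 : Nat)) : Int) := by push_cast; ring
    rw [hc, PySem.List.pyGetD_neg_natCast _ _ _ (by omega) (by omega)]
    simp [List.getElem_reverse]
    congr 1
    omega

theorem pvByteA_eq (l : List Int) (h : ∀ x ∈ l, x = 0 ∨ x = 1) :
    pvByteA l = String.ofList (l.map pvBitChar) := by
  unfold pvByteA
  congr 1
  rw [PySem.List.foldl_append_eq_flatMap]
  induction l with
  | nil => simp
  | cons x xs ih =>
    have hx := h x (by simp)
    simp only [List.nil_append] at ih ⊢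
    rw [List.flatMap_cons, List.map_cons, ih (fun y hy => h y (List.mem_cons_of_mem _ hy))]
    rcases hx with hx | hx <;> subst hx <;> rfl

theorem pvSlice_map (f : Int → Char) (l : List Int) (a b : Int) (ha : 0 ≤ a) (hb : 0 ≤ b) :
    (PySem.List.slice l (some a) (some b)).map f = PySem.List.slice (l.map f) (some a) (some b) := by
  rw [PySem.List.slice_toNat l ha hb, PySem.List.slice_toNat (l.map f) ha hb]
  simp [List.map_take, List.map_drop]

theorem pv_main (v : Int) :
    convert_int32_to_bytes v = convert_int32_to_bytes_alt v := by
  simp only [convert_int32_to_bytes, convert_int32_to_bytes_alt]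
  by_cases hv : v ≥ 0
  · have hvn : v = (v.toNat : Int) := (Int.toNat_of_nonneg hv).symm
    set n := v.toNat with hn
    rw [if_pos hv, if_pos hv]
    rw [hvn, pvLoopA_eq n [0], pvFlip_eq, pvDigitsB_eq n]
    have hmem : ∀ x ∈ (([(0:Int)] ++ pvLowBits n).reverse), x = 0 ∨ x = 1 := by
      intro x hx
      rw [List.mem_reverse] at hx
      rcases List.mem_append.mp hx with h | h
      · simp at h; omega
      · exact pvLowBits_mem n x h
    have hmap : (([(0:Int)] ++ pvLowBits n).reverse).map pvBitChar
        = (pvLowBits n).reverse.map pvBitChar ++ ['0'] := by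
      rw [List.reverse_append, List.map_append]
      rfl
    refine Prod.ext ?_ (Prod.ext ?_ (Prod.ext ?_ ?_)) <;>
      simp only [] <;>
      rw [pvByteA_eq _ (fun x hx => hmem x (PySem.List.mem_of_mem_slice _ _ _ hx)),
          pvSlice_map pvBitChar _ _ _ (by norm_num) (by norm_num), hmap]
  · have hneg : v < 0 := by omega
    rw [if_neg hv, if_neg hv]
    have hstop : ¬ 0 < PySem.Int.floordiv v 2 := by
      have := (PySem.Int.floordiv_lt_iff_lt_mul (a := v) (b := 2) (q := 1) (by omega)).mpr (by omega)
      omega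
    rw [pvLoopA, if_neg hstop, pvDigitsB, if_neg hstop]
    decide

-- ===== VERDICT (by name: the statement is the Claim_ definition above) =====
theorem convert_int32_to_bytes_spec : Claim_equal_convert_int32_to_bytes := by
  intro v _
  unfold Spec_convert_int32_to_bytes
  exact pv_main v
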